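-- pv_equiv track=rewrite | github.com/Saraa1313/JobForge | src/generate_and_label_all_in_one.py | map_job_category
-- ===== SOURCE A (Python) =====
-- def map_job_category(category):
--     """Map job categories to standard roles"""
--     cat_lower = str(category).lower()
--
--     # First check if it's a known tech category
--     if any(term in cat_lower for term in ['software engineer', 'fullstack', 'backend',
--                                             'mobile', 'ios', 'android']):
--         return 'SWE'
--     elif any(term in cat_lower for term in ['frontend', 'front-end', 'ui']):
--         return 'FE'
--     elif any(term in cat_lower for term in ['machine learning', 'ml engineer', 'ai']):
--         return 'ML'
--     elif any(term in cat_lower for term in ['data scientist', 'data science']):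
--         return 'DS'
--     elif any(term in cat_lower for term in ['data engineer', 'data analyst']):
--         return 'DA'
--     elif any(term in cat_lower for term in ['devops', 'sre', 'cloud', 'infrastructure']):
--         return 'DEVOPS'
--     elif any(term in cat_lower for term in ['product manager', 'pm']):
--         return 'PM'
--     elif any(term in cat_lower for term in ['hardware', 'embedded']):
--         return 'SWE'  # Hardware is somewhat tech-related
--     else:
--         # Unknown category - likely not tech
--         return 'OTHER'  # Changed from 'SWE'!
-- ===== SOURCE B (Python) =====
-- # B: flat keyword list with priority ranks; collect ALL matches, then pick the
-- # minimum-rank one (no early-exit cascade).  Ranks mirror A's branch order, so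
-- # the minimum-rank match equals A's first-matching branch.
-- KEYWORDS = [
--     ('software engineer', 0, 'SWE'), ('fullstack', 0, 'SWE'), ('backend', 0, 'SWE'),
--     ('mobile', 0, 'SWE'), ('ios', 0, 'SWE'), ('android', 0, 'SWE'),
--     ('frontend', 1, 'FE'), ('front-end', 1, 'FE'), ('ui', 1, 'FE'),
--     ('machine learning', 2, 'ML'), ('ml engineer', 2, 'ML'), ('ai', 2, 'ML'),
--     ('data scientist', 3, 'DS'), ('data science', 3, 'DS'),
--     ('data engineer', 4, 'DA'), ('data analyst', 4, 'DA'),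
--     ('devops', 5, 'DEVOPS'), ('sre', 5, 'DEVOPS'), ('cloud', 5, 'DEVOPS'),
--     ('infrastructure', 5, 'DEVOPS'),
--     ('product manager', 6, 'PM'), ('pm', 6, 'PM'),
--     ('hardware', 7, 'SWE'), ('embedded', 7, 'SWE'),
-- ]
--
-- def map_job_category(category):
--     """Map job categories to standard roles"""
--     cat_lower = str(category).lower()
--     matches = [(rank, code) for term, rank, code in KEYWORDS if term in cat_lower]
--     if not matches:
--         return 'OTHER'
--     return min(matches, key=lambda m: m[0])[1]
-- ===== Notes on version B (the rewrite author's own statement) =====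
-- stated objective: alternative
-- what changed: Replaces the early-exit if/elif cascade with a flat keyword table carrying priority ranks: B collects ALL matching keywords in one comprehension and then selects the code of the minimum-rank match, instead of testing branch groups in order and returning at the first hit.
import Mathlib
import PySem

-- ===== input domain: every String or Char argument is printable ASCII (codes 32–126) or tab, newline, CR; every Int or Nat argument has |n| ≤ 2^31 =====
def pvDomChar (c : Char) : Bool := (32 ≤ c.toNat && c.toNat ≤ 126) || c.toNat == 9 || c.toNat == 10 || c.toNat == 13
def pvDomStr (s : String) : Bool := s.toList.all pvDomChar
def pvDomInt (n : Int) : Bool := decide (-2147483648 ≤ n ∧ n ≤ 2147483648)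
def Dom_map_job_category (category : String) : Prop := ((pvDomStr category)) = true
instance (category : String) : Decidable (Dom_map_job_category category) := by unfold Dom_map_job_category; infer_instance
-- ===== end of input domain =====

-- B replaces A's early-exit if/elif cascade by collecting ALL matching keywords
-- from a flat ranked table and selecting the minimum-rank match (objective: alternative).

-- ===== PORT A =====
def map_job_category (category : String) : String :=
  let cat_lower := PySem.Str.lower category
  if ["software engineer", "fullstack", "backend", "mobile", "ios", "android"].any
      (fun term => PySem.Str.isIn term cat_lower) then "SWE"
  else if ["frontend", "front-end", "ui"].any (fun term => PySem.Str.isIn term cat_lower) then "FE"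
  else if ["machine learning", "ml engineer", "ai"].any (fun term => PySem.Str.isIn term cat_lower) then "ML"
  else if ["data scientist", "data science"].any (fun term => PySem.Str.isIn term cat_lower) then "DS"
  else if ["data engineer", "data analyst"].any (fun term => PySem.Str.isIn term cat_lower) then "DA"
  else if ["devops", "sre", "cloud", "infrastructure"].any (fun term => PySem.Str.isIn term cat_lower) then "DEVOPS"
  else if ["product manager", "pm"].any (fun term => PySem.Str.isIn term cat_lower) then "PM"
  else if ["hardware", "embedded"].any (fun term => PySem.Str.isIn term cat_lower) then "SWE"
  else "OTHER"

-- ===== PORT B =====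
def mapKEYWORDS : List (String × Nat × String) :=
  [ ("software engineer", 0, "SWE"), ("fullstack", 0, "SWE"), ("backend", 0, "SWE"),
    ("mobile", 0, "SWE"), ("ios", 0, "SWE"), ("android", 0, "SWE"),
    ("frontend", 1, "FE"), ("front-end", 1, "FE"), ("ui", 1, "FE"),
    ("machine learning", 2, "ML"), ("ml engineer", 2, "ML"), ("ai", 2, "ML"),
    ("data scientist", 3, "DS"), ("data science", 3, "DS"),
    ("data engineer", 4, "DA"), ("data analyst", 4, "DA"),
    ("devops", 5, "DEVOPS"), ("sre", 5, "DEVOPS"), ("cloud", 5, "DEVOPS"),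
    ("infrastructure", 5, "DEVOPS"),
    ("product manager", 6, "PM"), ("pm", 6, "PM"),
    ("hardware", 7, "SWE"), ("embedded", 7, "SWE") ]

def map_job_category_alt (category : String) : String :=
  let cat_lower := PySem.Str.lower category
  let ms := mapKEYWORDS.filterMap
    (fun p => if PySem.Str.isIn p.1 cat_lower then some (p.2.1, p.2.2) else none)
  if ms = [] then "OTHER"
  else
    match PySem.List.min? ms (fun m => m.1) with
    | some m => m.2
    | none => "OTHER"   -- unreachable: ms ≠ []

-- ===== PRECONDITION & SPEC =====
def Spec_map_job_category (category : String) (out : String) : Prop := out = map_job_category_alt category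
instance (category : String) (out : String) : Decidable (Spec_map_job_category category out) := by unfold Spec_map_job_category; infer_instance

-- ===== CLAIM =====
def Claim_equal_map_job_category : Prop := ∀ (category : String), Dom_map_job_category category → Spec_map_job_category category (map_job_category category)

-- ===== LEMMAS AND PROOFS =====

-- A's cascade, expressed as recursion over rule groups (proof-side view of A).
def pvCascade (c : String) : List (List String × String) → String
  | [] => "OTHER"
  | (ts, code) :: rest =>
      if ts.any (fun t => PySem.Str.isIn t c) then code else pvCascade c rest

def pvRULES : List (List String × String) :=
  [ (["software engineer", "fullstack", "backend", "mobile", "ios", "android"], "SWE"),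
    (["frontend", "front-end", "ui"], "FE"),
    (["machine learning", "ml engineer", "ai"], "ML"),
    (["data scientist", "data science"], "DS"),
    (["data engineer", "data analyst"], "DA"),
    (["devops", "sre", "cloud", "infrastructure"], "DEVOPS"),
    (["product manager", "pm"], "PM"),
    (["hardware", "embedded"], "SWE") ]

-- B's matches list, grouped by rules, ranks starting at k.
def pvMatches (c : String) : Nat → List (List String × String) → List (Nat × String)
  | _, [] => []
  | k, (ts, code) :: rest =>
      ts.filterMap (fun t => if PySem.Str.isIn t c then some (k, code) else none)
        ++ pvMatches c (k + 1) rest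

theorem pvMatches_rank_ge (c : String) (rules : List (List String × String)) (k : Nat) :
    ∀ p ∈ pvMatches c k rules, k ≤ p.1 := by
  induction rules generalizing k with
  | nil => intro p hp; simp [pvMatches] at hp
  | cons hd tl ih =>
    obtain ⟨ts, code⟩ := hd
    intro p hp
    rw [pvMatches, List.mem_append] at hp
    rcases hp with hp | hp
    · obtain ⟨t, _, ht⟩ := List.mem_filterMap.mp hp
      split at ht
      · cases ht; exact le_refl _
      · cases ht
    · exact Nat.le_of_succ_le (ih (k + 1) p hp)

theorem pvCascade_eq_min (c : String) (rules : List (List String × String)) (k : Nat) :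
    pvCascade c rules =
      (if pvMatches c k rules = [] then "OTHER"
       else
         match PySem.List.min? (pvMatches c k rules) (fun m => m.1) with
         | some m => m.2
         | none => "OTHER") := by
  induction rules generalizing k with
  | nil => rw [pvCascade, pvMatches]; rfl
  | cons hd tl ih =>
    obtain ⟨ts, code⟩ := hd
    by_cases hany : ts.any (fun t => PySem.Str.isIn t c) = true
    · -- head group matches: cascade returns its code; B's min is (k, code)
      obtain ⟨t, htmem, ht⟩ := List.any_eq_true.mp hany
      have hblk : (k, code) ∈ ts.filterMap
          (fun t => if PySem.Str.isIn t c then some ((k : Nat), code) else none) :=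
        List.mem_filterMap.mpr ⟨t, htmem, by rw [ht]; rfl⟩
      have hmem : (k, code) ∈ pvMatches c k ((ts, code) :: tl) := by
        rw [pvMatches, List.mem_append]; exact Or.inl hblk
      have hne : pvMatches c k ((ts, code) :: tl) ≠ [] := List.ne_nil_of_mem hmem
      obtain ⟨m, hm⟩ : ∃ m, PySem.List.min? (pvMatches c k ((ts, code) :: tl)) (fun m => m.1) = some m := by
        cases hmin : PySem.List.min? (pvMatches c k ((ts, code) :: tl)) (fun m => m.1) with
        | none => exact absurd ((PySem.List.min?_eq_none_iff _ _).mp hmin) hne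
        | some m => exact ⟨m, rfl⟩
      have hmmem : m ∈ pvMatches c k ((ts, code) :: tl) := PySem.List.min?_mem hm
      have hle : m.1 ≤ k := PySem.List.min?_isMin hm (k, code) hmem
      have hmeq : m = (k, code) := by
        rw [pvMatches, List.mem_append] at hmmem
        rcases hmmem with hin | hin
        · obtain ⟨t', _, ht'⟩ := List.mem_filterMap.mp hin
          split at ht'
          · cases ht'; rfl
          · cases ht'
        · have := pvMatches_rank_ge c tl (k + 1) m hin
          omega
      rw [pvCascade, if_pos hany, if_neg hne, hm, hmeq]
    · -- head group does not match: its block is empty, recurse with rank k+1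
      have hblk : ts.filterMap (fun t => if PySem.Str.isIn t c then some ((k : Nat), code) else none) = [] := by
        rw [List.filterMap_eq_nil_iff]
        intro t htmem
        have hf : PySem.Str.isIn t c = false := by
          cases h : PySem.Str.isIn t c
          · rfl
          · exact absurd (List.any_eq_true.mpr ⟨t, htmem, h⟩) hany
        rw [hf]; rfl
      have hstep : pvMatches c k ((ts, code) :: tl) = pvMatches c (k + 1) tl := by
        rw [pvMatches, hblk]; rfl
      rw [pvCascade, if_neg hany, hstep]
      exact ih (k + 1)

theorem map_job_category_eq_cascade (category : String) :
    map_job_category category = pvCascade (PySem.Str.lower category) pvRULES := by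
  rfl

theorem map_job_category_alt_eq_min (category : String) :
    map_job_category_alt category =
      (if pvMatches (PySem.Str.lower category) 0 pvRULES = [] then "OTHER"
       else
         match PySem.List.min? (pvMatches (PySem.Str.lower category) 0 pvRULES) (fun m => m.1) with
         | some m => m.2
         | none => "OTHER") := by
  have hkw : mapKEYWORDS =
      (["software engineer", "fullstack", "backend", "mobile", "ios", "android"].map
        (fun t => (t, (0 : Nat), "SWE")))
      ++ (["frontend", "front-end", "ui"].map (fun t => (t, (1 : Nat), "FE")))
      ++ (["machine learning", "ml engineer", "ai"].map (fun t => (t, (2 : Nat), "ML")))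
      ++ (["data scientist", "data science"].map (fun t => (t, (3 : Nat), "DS")))
      ++ (["data engineer", "data analyst"].map (fun t => (t, (4 : Nat), "DA")))
      ++ (["devops", "sre", "cloud", "infrastructure"].map (fun t => (t, (5 : Nat), "DEVOPS")))
      ++ (["product manager", "pm"].map (fun t => (t, (6 : Nat), "PM")))
      ++ (["hardware", "embedded"].map (fun t => (t, (7 : Nat), "SWE"))) := by rfl
  have h : mapKEYWORDS.filterMap
      (fun p => if PySem.Str.isIn p.1 (PySem.Str.lower category) then some (p.2.1, p.2.2) else none)
      = pvMatches (PySem.Str.lower category) 0 pvRULES := by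
    rw [hkw]
    simp only [List.filterMap_append, List.filterMap_map, Function.comp]
    simp [pvMatches, pvRULES, List.append_assoc]
  show (if mapKEYWORDS.filterMap
      (fun p => if PySem.Str.isIn p.1 (PySem.Str.lower category) then some (p.2.1, p.2.2) else none) = [] then "OTHER"
    else
      match PySem.List.min? (mapKEYWORDS.filterMap
        (fun p => if PySem.Str.isIn p.1 (PySem.Str.lower category) then some (p.2.1, p.2.2) else none)) (fun m => m.1) with
      | some m => m.2
      | none => "OTHER") = _
  rw [h]

-- ===== VERDICT =====
theorem map_job_category_spec : Claim_equal_map_job_category := by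
  intro category _
  unfold Spec_map_job_category
  rw [map_job_category_eq_cascade, map_job_category_alt_eq_min]
  exact pvCascade_eq_min (PySem.Str.lower category) pvRULES 0
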